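-- pv_equiv track=rewrite | github.com/LeeHyunJin1997/Algorithm | SWEA/D4/1210.py | check
-- ===== SOURCE A (Python) =====
-- def check(ladders, x, y):
--     # 위치가 양쪽 끝 사다리라면, 확인 가능한 쪽만 진행
--     if y == 99:
--         # 옆으로 건너갈 다리를 만나면
--         if ladders[x][y-1] == 1:
--             while True:
--                 # 0 이면 멈춰
--                 if y == 0:
--                     break
--                 # 쭉 가
--                 elif ladders[x][y-1] == 1:
--                     y = y - 1
--                 else:
--                     break
--     elif y == 0:
--         if ladders[x][y+1] == 1:
--             while True:
--                 if y == 99: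
--                     break
--                 elif ladders[x][y+1] == 1:
--                     y = y + 1
--                 else:
--                     break
--     else:
--         if ladders[x][y+1] == 1:
--             while True:
--                 if y == 99:
--                     break
--                 elif ladders[x][y+1] == 1:
--                     y = y + 1
--                 else:
--                     break
--         elif ladders[x][y-1] == 1:
--             while True:
--                 if y == 0:
--                     break
--                 elif ladders[x][y-1] == 1:
--                     y = y - 1
--                 else:
--                     break
--
--     return y
-- ===== SOURCE B (Python) =====
-- def check(ladders, x, y):
--     row = ladders[x]
--     n = len(row)
--     # run-length encode the whole row once into (value, start, end) blocks
--     runs = []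
--     start = 0
--     for i, v in enumerate(row):
--         if i + 1 == n or row[i + 1] != v:
--             runs.append((v, start, i + 1))
--             start = i + 1
--
--     def block(k):
--         for v, s, e in runs:
--             if s <= k < e:
--                 return (v, s, e)
--         return None
--
--     if y < 99:
--         b = block(y + 1)
--         if b is not None and b[0] == 1:
--             return min(b[2] - 1, 99)
--     if y > 0:
--         b = block(y - 1)
--         if b is not None and b[0] == 1:
--             return b[1]
--     return y
-- ===== Notes on version B (the rewrite author's own statement) =====
-- stated objective: alternative
-- what changed: A walks cell by cell from y with three duplicated decide-then-step while loops; B first run-length-encodes the whole row into (value,start,end) blocks in one pass and then answers by looking up the block containing the chosen neighbour: right move returns min(block_end-1, 99), left move returns block_start, so no stepwise walk from y exists.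
-- outside the precondition, e.g. on check([[1, 0, 1]], 0, -2): A returns 0, B returns -2
import Mathlib
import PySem

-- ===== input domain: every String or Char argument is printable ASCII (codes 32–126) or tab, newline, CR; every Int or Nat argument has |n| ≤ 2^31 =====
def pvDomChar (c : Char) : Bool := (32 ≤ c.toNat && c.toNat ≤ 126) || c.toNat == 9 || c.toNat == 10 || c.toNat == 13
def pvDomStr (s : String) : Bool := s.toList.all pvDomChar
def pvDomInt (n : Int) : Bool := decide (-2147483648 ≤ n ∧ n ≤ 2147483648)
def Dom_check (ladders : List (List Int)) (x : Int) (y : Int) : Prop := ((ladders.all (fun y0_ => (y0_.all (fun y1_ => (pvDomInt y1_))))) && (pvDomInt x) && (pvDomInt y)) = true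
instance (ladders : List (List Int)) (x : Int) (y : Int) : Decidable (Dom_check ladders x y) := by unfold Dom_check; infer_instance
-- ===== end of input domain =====

-- B replaces A's three stepwise while-loop walks from y by run-length encoding the whole
-- row once into (value, start, end) blocks and answering by a lookup of the block that
-- contains the chosen neighbour (objective: alternative algorithm, not faster).

-- ===== PORT A =====
-- the 'while True' loop walking left; fuel y.toNat is enough inside Pre_ (y decreases to 0)
def goLeft (row : List Int) : Nat → Int → Int
  | 0, y => y
  | n+1, y =>
    if y = 0 then y
    else if PySem.List.pyGetD row (y - 1) 0 = 1 then goLeft row n (y - 1)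
    else y

-- the 'while True' loop walking right; fuel (99 - y).toNat is enough inside Pre_
def goRight (row : List Int) : Nat → Int → Int
  | 0, y => y
  | n+1, y =>
    if y = 99 then y
    else if PySem.List.pyGetD row (y + 1) 0 = 1 then goRight row n (y + 1)
    else y

def check (ladders : List (List Int)) (x : Int) (y : Int) : Int :=
  if y = 99 then
    if PySem.List.pyGetD (PySem.List.pyGetD ladders x []) (y - 1) 0 = 1 then
      goLeft (PySem.List.pyGetD ladders x []) y.toNat y
    else y
  else if y = 0 then
    if PySem.List.pyGetD (PySem.List.pyGetD ladders x []) (y + 1) 0 = 1 then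
      goRight (PySem.List.pyGetD ladders x []) (99 - y).toNat y
    else y
  else
    if PySem.List.pyGetD (PySem.List.pyGetD ladders x []) (y + 1) 0 = 1 then
      goRight (PySem.List.pyGetD ladders x []) (99 - y).toNat y
    else if PySem.List.pyGetD (PySem.List.pyGetD ladders x []) (y - 1) 0 = 1 then
      goLeft (PySem.List.pyGetD ladders x []) y.toNat y
    else y

-- ===== PORT B =====
-- Source B's 'for i, v in enumerate(row)' building the run-length encoding; state is
-- (runs, start).  Python reads row[i + 1] only when i + 1 < n (short-circuit 'or'),
-- so List.getD is exact on every index actually read.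
def buildLoop (row : List Int) : Nat → List Int → List (Int × Int × Int) × Int → List (Int × Int × Int) × Int
  | _, [], st => st
  | i, v :: rest, st =>
    buildLoop row (i + 1) rest
      (if i + 1 = row.length ∨ row.getD (i + 1) 0 ≠ v then
        (st.1 ++ [(v, st.2, (i : Int) + 1)], (i : Int) + 1)
      else st)

def buildRuns (row : List Int) : List (Int × Int × Int) :=
  (buildLoop row 0 row ([], 0)).1

-- Source B's 'block(k)': first run whose [start, end) contains k, else None
def block? : List (Int × Int × Int) → Int → Option (Int × Int × Int)
  | [], _ => none
  | r :: t, k => if r.2.1 ≤ k ∧ k < r.2.2 then some r else block? t k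

-- the second 'if y > 0: …' plus the final 'return y' of Source B
def leftCase (runs : List (Int × Int × Int)) (y : Int) : Int :=
  if 0 < y then
    match block? runs (y - 1) with
    | some (v, s, _) => if v = 1 then s else y
    | none => y
  else y

def check_alt (ladders : List (List Int)) (x : Int) (y : Int) : Int :=
  let row := PySem.List.pyGetD ladders x []
  let runs := buildRuns row
  match (if y < 99 then block? runs (y + 1) else none) with
  | some (v, _, e) => if v = 1 then min (e - 1) 99 else leftCase runs y
  | none => leftCase runs y

-- ===== PRECONDITION & SPEC =====
-- Pre_ excludes the inputs where Python A raises IndexError (row index x out of range, a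
-- neighbour guard read off the row, or a walk that would run off a short row), and the
-- negative-y inputs where a wrapped guard equals 1, on which A's walk through Python's
-- negative-index wraparound yields an accidental column (or raises).
def Pre_check (ladders : List (List Int)) (x : Int) (y : Int) : Prop :=
  -(ladders.length : Int) ≤ x ∧ x < ladders.length ∧ y ≤ 99 ∧
  ((0 ≤ y ∧
     ((y = 99 ∧ 99 ≤ (PySem.List.pyGetD ladders x []).length) ∨
      (y < 99 ∧ y + 1 < ((PySem.List.pyGetD ladders x []).length : Int) ∧
        (PySem.List.pyGetD (PySem.List.pyGetD ladders x []) (y + 1) 0 = 1 →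
          ¬ ((PySem.List.pyGetD ladders x []).drop (y + 1).toNat).all (· == 1) ∨
            100 ≤ (PySem.List.pyGetD ladders x []).length)))) ∨
   (y < 0 ∧ -(((PySem.List.pyGetD ladders x []).length : Int)) ≤ y - 1 ∧
     PySem.List.pyGetD (PySem.List.pyGetD ladders x []) (y + 1) 0 ≠ 1 ∧
     PySem.List.pyGetD (PySem.List.pyGetD ladders x []) (y - 1) 0 ≠ 1))
instance (ladders : List (List Int)) (x : Int) (y : Int) : Decidable (Pre_check ladders x y) := by unfold Pre_check; infer_instance

def pvWitness_check : List (List Int) × Int × Int := ([List.replicate 100 0], 0, 0)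

def Spec_check (ladders : List (List Int)) (x : Int) (y : Int) (out : Int) : Prop := out = check_alt ladders x y
instance (ladders : List (List Int)) (x : Int) (y : Int) (out : Int) : Decidable (Spec_check ladders x y out) := by unfold Spec_check; infer_instance

-- ===== CLAIM (what is proved, stated in full; the proofs are below) =====
def Claim_equal_check : Prop := ∀ (ladders : List (List Int)) (x : Int) (y : Int), Dom_check ladders x y → Pre_check ladders x y → Spec_check ladders x y (check ladders x y)

-- ===== LEMMAS AND PROOFS =====

-- length of the leading run of 1s (proof-side measure linking A's walks to B's blocks)
def runLen : List Int → Int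
  | [] => 0
  | v :: t => if v ≠ 1 then 0 else 1 + runLen t

-- a correct run of the row: constant value v on [s, e), maximal on both sides
def goodRun (row : List Int) (v s e : Int) : Prop :=
  0 ≤ s ∧ s < e ∧ e ≤ row.length ∧ v = row.getD s.toNat 0 ∧
  (∀ j : Int, s ≤ j → j < e → row.getD j.toNat 0 = v) ∧
  (s = 0 ∨ row.getD (s - 1).toNat 0 ≠ v) ∧
  (e = row.length ∨ row.getD e.toNat 0 ≠ v)

-- loop invariant of buildLoop after the first i elements, with state (runs, start)
def RunsInv (row : List Int) (i : Nat) (runs : List (Int × Int × Int)) (start : Int) : Prop :=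
  0 ≤ start ∧ start ≤ i ∧ i ≤ row.length ∧
  (∀ j : Int, start ≤ j → j ≤ i → j < row.length → row.getD j.toNat 0 = row.getD start.toNat 0) ∧
  (start = 0 ∨ start = row.length ∨ row.getD (start - 1).toNat 0 ≠ row.getD start.toNat 0) ∧
  (∀ k : Int, 0 ≤ k → k < start →
    ∃ v s e, block? runs k = some (v, s, e) ∧ s ≤ k ∧ k < e ∧ goodRun row v s e) ∧
  (∀ k : Int, k < 0 ∨ start ≤ k → block? runs k = none)

lemma block?_append (l : List (Int × Int × Int)) (r : Int × Int × Int) (k : Int) :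
    block? (l ++ [r]) k =
      match block? l k with
      | some a => some a
      | none => if r.2.1 ≤ k ∧ k < r.2.2 then some r else none := by
  induction l with
  | nil => simp [block?]
  | cons a t ih =>
    by_cases h : a.2.1 ≤ k ∧ k < a.2.2
    · simp [block?, h]
    · simpa [block?, h] using ih

lemma runLen_nonneg (l : List Int) : 0 ≤ runLen l := by
  induction l with
  | nil => simp [runLen]
  | cons v t ih =>
    by_cases h : v ≠ 1
    · simp [runLen, h]
    · simp [runLen, h]
      omega

lemma runLen_eq_of (m : Nat) : ∀ (l : List Int), (∀ j : Nat, j < m → l.getD j 0 = 1) →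
    (l.length = m ∨ l.getD m 0 ≠ 1) → runLen l = m := by
  induction m with
  | zero =>
    intro l _ hstop
    rcases hstop with h | h
    · rw [List.length_eq_zero_iff.mp h]; simp [runLen]
    · cases l with
      | nil => simp [runLen]
      | cons v t =>
        simp only [List.getD_cons_zero] at h
        simp [runLen, h]
  | succ m ih =>
    intro l hall hstop
    cases l with
    | nil =>
      exfalso
      have := hall 0 (by omega)
      simp [List.getD] at this
    | cons v t =>
      have hv : v = 1 := by
        have := hall 0 (by omega)
        simpa using this
      have ht : runLen t = m := by
        apply ih
        · intro j hj
          have := hall (j + 1) (by omega)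
          simpa using this
        · rcases hstop with h | h
          · left; simpa using h
          · right; simpa using h
      simp [runLen, hv, ht]
      ring

lemma runLen_take (l : List Int) : ∀ (k : Nat), runLen (l.take k) = min (k : Int) (runLen l) := by
  induction l with
  | nil => intro k; simp [runLen]
  | cons v t ih =>
    intro k
    cases k with
    | zero =>
      have := runLen_nonneg (v :: t)
      simp only [List.take_zero, runLen.eq_1, Nat.cast_zero]
      omega
    | succ k =>
      by_cases h : v = 1
      · have ht := runLen_nonneg t
        simp only [List.take_succ_cons, runLen, h, ne_eq, not_true_eq_false, if_false]
        rw [ih k]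
        push_cast
        omega
      · have : (0 : Int) ≤ (k : Int) + 1 := by positivity
        simp [runLen, h, this]

lemma buildLoop_inv (t : List Int) : ∀ (row : List Int) (i : Nat) (runs : List (Int × Int × Int)) (start : Int),
    row.drop i = t → RunsInv row i runs start →
    RunsInv row row.length (buildLoop row i t (runs, start)).1 (buildLoop row i t (runs, start)).2
    ∧ (t ≠ [] → (buildLoop row i t (runs, start)).2 = (row.length : Int)) := by
  induction t with
  | nil =>
    intro row i runs start hdrop hinv
    have hlen : row.length ≤ i := by
      have := List.drop_eq_nil_iff.mp hdrop
      omega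
    have hi : i = row.length := le_antisymm hinv.2.2.1 hlen
    rw [show buildLoop row i [] (runs, start) = (runs, start) from rfl, ← hi]
    exact ⟨hinv, by simp⟩
  | cons v rest ih =>
    intro row i runs start hdrop hinv
    obtain ⟨h0, hsi, hin, hpend, hLB, hP5, hP6⟩ := hinv
    have hi_lt : i < row.length := by
      have := congrArg List.length hdrop
      simp at this
      omega
    have hrowi : row.getD i 0 = v := by
      have h1 : row[i]? = some v := by
        have h2 : (row.drop i)[0]? = row[i + 0]? := List.getElem?_drop
        rw [hdrop] at h2
        simpa using h2.symm
      simp [List.getD_eq_getElem?_getD, h1]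
    have hrest : row.drop (i + 1) = rest := by
      have h1 : (row.drop i).drop 1 = row.drop (i + 1) := List.drop_drop
      rw [hdrop] at h1
      simpa using h1.symm
    have hstep : buildLoop row i (v :: rest) (runs, start) =
        buildLoop row (i + 1) rest
          (if i + 1 = row.length ∨ row.getD (i + 1) 0 ≠ v then
            (runs ++ [(v, start, (i : Int) + 1)], (i : Int) + 1)
          else (runs, start)) := rfl
    by_cases hc : i + 1 = row.length ∨ row.getD (i + 1) 0 ≠ v
    · -- the run closes at index i: append (v, start, i+1), pending restarts at i+1
      have hvs : v = row.getD start.toNat 0 := by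
        have := hpend (i : Int) hsi (le_refl _) (by exact_mod_cast hi_lt)
        rw [Int.toNat_natCast] at this
        omega
      have hgood : goodRun row v start ((i : Int) + 1) := by
        refine ⟨h0, by omega, by exact_mod_cast hi_lt, hvs, ?_, ?_, ?_⟩
        · intro j h1 h2
          have h3 : j ≤ (i : Int) := by omega
          rw [hpend j h1 h3 (by omega), ← hvs]
        · rcases hLB with h | h | h
          · exact Or.inl h
          · exfalso; omega
          · rw [← hvs] at h; exact Or.inr h
        · rcases hc with h | h
          · exact Or.inl (by exact_mod_cast h)
          · refine Or.inr ?_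
            rw [show ((i : Int) + 1).toNat = i + 1 by omega]
            exact h
      have hinv' : RunsInv row (i + 1) (runs ++ [(v, start, (i : Int) + 1)]) ((i : Int) + 1) := by
        refine ⟨by omega, by push_cast; omega, by omega, ?_, ?_, ?_, ?_⟩
        · intro j h1 h2 h3
          have : j = (i : Int) + 1 := by push_cast at h2; omega
          rw [this]
        · rcases hc with h | h
          · exact Or.inr (Or.inl (by exact_mod_cast h))
          · refine Or.inr (Or.inr ?_)
            rw [show ((i : Int) + 1 - 1).toNat = i by omega,
              show ((i : Int) + 1).toNat = i + 1 by omega, hrowi]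
            exact fun hx => h hx.symm
        · intro k hk0 hk
          by_cases hks : k < start
          · obtain ⟨v', s, e, hb, hsk, hke, hg⟩ := hP5 k hk0 hks
            exact ⟨v', s, e, by rw [block?_append, hb], hsk, hke, hg⟩
          · have hks' : start ≤ k := by omega
            have hnone := hP6 k (Or.inr hks')
            refine ⟨v, start, (i : Int) + 1, ?_, hks', by omega, hgood⟩
            rw [block?_append, hnone]
            simp only []
            rw [if_pos (show start ≤ k ∧ k < (i : Int) + 1 from ⟨hks', by omega⟩)]
        · intro k hk
          have hk' : k < 0 ∨ start ≤ k := by omega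
          have hnone := hP6 k hk'
          rw [block?_append, hnone]
          simp only []
          rw [if_neg (show ¬ (start ≤ k ∧ k < (i : Int) + 1) from by rintro ⟨ha, hb⟩; omega)]
      rw [hstep, if_pos hc]
      refine ⟨(ih row (i + 1) _ _ hrest hinv').1, fun _ => ?_⟩
      by_cases hre : rest = []
      · have h1 : row.length ≤ i + 1 := by
          have := List.drop_eq_nil_iff.mp (hre ▸ hrest)
          omega
        rw [hre, show buildLoop row (i + 1) []
          (runs ++ [(v, start, (i : Int) + 1)], (i : Int) + 1) =
          (runs ++ [(v, start, (i : Int) + 1)], (i : Int) + 1) from rfl]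
        show (i : Int) + 1 = (row.length : Int)
        omega
      · exact (ih row (i + 1) _ _ hrest hinv').2 hre
    · -- the run continues through index i+1
      push Not at hc
      obtain ⟨hc1, hc2⟩ := hc
      have hinv' : RunsInv row (i + 1) runs start := by
        refine ⟨h0, by push_cast at hsi ⊢; omega, by omega, ?_, hLB, hP5, hP6⟩
        intro j h1 h2 h3
        by_cases hj : j ≤ (i : Int)
        · exact hpend j h1 hj h3
        · have hji : j = (i : Int) + 1 := by push_cast at h2; omega
          have h4 : row.getD j.toNat 0 = v := by
            rw [hji, show ((i : Int) + 1).toNat = i + 1 by omega]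
            exact hc2
          have h5 := hpend (i : Int) hsi (le_refl _) (by exact_mod_cast hi_lt)
          rw [Int.toNat_natCast] at h5
          rw [h4, ← hrowi, h5]
      rw [hstep, if_neg (by push Not; exact ⟨hc1, hc2⟩)]
      refine ⟨(ih row (i + 1) _ _ hrest hinv').1, fun _ => ?_⟩
      by_cases hre : rest = []
      · exfalso
        have := List.drop_eq_nil_iff.mp (hre ▸ hrest)
        omega
      · exact (ih row (i + 1) _ _ hrest hinv').2 hre

lemma buildRuns_spec (row : List Int) :
    (∀ k : Int, 0 ≤ k → k < (row.length : Int) →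
      ∃ v s e, block? (buildRuns row) k = some (v, s, e) ∧ s ≤ k ∧ k < e ∧ goodRun row v s e) ∧
    (∀ k : Int, k < 0 ∨ (row.length : Int) ≤ k → block? (buildRuns row) k = none) := by
  by_cases hrow : row = []
  · subst hrow
    refine ⟨fun k hk0 hk => absurd hk (by simp; omega), fun k _ => rfl⟩
  · have hinit : RunsInv row 0 [] 0 := by
      refine ⟨le_refl 0, by simp, Nat.zero_le _, ?_, Or.inl rfl, ?_, fun k _ => rfl⟩
      · intro j h1 h2 _
        have : j = 0 := by simp at h2; omega
        rw [this]
      · intro k h1 h2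
        omega
    obtain ⟨hfin, hst⟩ := buildLoop_inv row row 0 [] 0 rfl hinit
    have hs : (buildLoop row 0 row ([], 0)).2 = (row.length : Int) := hst hrow
    obtain ⟨-, -, -, -, -, hP5, hP6⟩ := hfin
    refine ⟨fun k hk0 hklt => hP5 k hk0 (by rw [hs]; exact hklt),
      fun k hk => hP6 k ?_⟩
    rcases hk with h | h
    · exact Or.inl h
    · exact Or.inr (by rw [hs]; exact h)

-- reading past the end of the row at a nonnegative index gives the default
lemma pyGetD_oor (xs : List Int) (i : Int) (d : Int) (h0 : 0 ≤ i)
    (h : xs.length ≤ i.toNat) : PySem.List.pyGetD xs i d = d := by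
  have h1 : PySem.List.pyGet? xs i = xs[i.toNat]? := PySem.List.pyGet?_of_nonneg xs h0
  simp [PySem.List.pyGetD, h1, List.getElem?_eq_none h]

lemma goRight_eq (n : Nat) : ∀ (row : List Int) (y : Int), 0 ≤ y → y + n = 99 →
    goRight row n y = y + runLen ((row.drop (y + 1).toNat).take n) := by
  induction n with
  | zero =>
    intro row y hy hn
    simp [goRight, runLen]
  | succ n ih =>
    intro row y hy hn
    have hne : y ≠ 99 := by omega
    have h2 : ((y + 1) + 1).toNat = (y + 1).toNat + 1 := by omega
    by_cases hin : (y + 1).toNat < row.length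
    · have hget : PySem.List.pyGetD row (y + 1) 0 = row[(y + 1).toNat] :=
        PySem.List.pyGetD_eq_getElem row 0 (by omega) (by omega)
      have hdrop : row.drop (y + 1).toNat = row[(y + 1).toNat] :: row.drop ((y + 1).toNat + 1) :=
        List.drop_eq_getElem_cons hin
      by_cases hc : row[(y + 1).toNat] = 1
      · rw [goRight, if_neg hne, hget, if_pos hc, ih row (y + 1) (by omega) (by omega), h2,
          hdrop, List.take_succ_cons]
        simp only [runLen]
        rw [if_neg (not_not_intro hc)]
        ring
      · rw [goRight, if_neg hne, hget, if_neg hc, hdrop, List.take_succ_cons]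
        simp only [runLen]
        rw [if_pos hc]
        simp
    · have hget : PySem.List.pyGetD row (y + 1) 0 = 0 :=
        pyGetD_oor row (y + 1) 0 (by omega) (by omega)
      have hdrop : row.drop (y + 1).toNat = [] := by
        apply List.drop_eq_nil_of_le; omega
      rw [goRight, if_neg hne, hget, if_neg (by norm_num), hdrop]
      simp [runLen]

lemma goLeft_eq (n : Nat) : ∀ (row : List Int) (y : Int), y = (n : Int) →
    y.toNat ≤ row.length → goLeft row n y = y - runLen (row.take y.toNat).reverse := by
  induction n with
  | zero =>
    intro row y hn _
    subst hn
    simp [goLeft, runLen]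
  | succ n ih =>
    intro row y hn hyL
    have hidx : n < row.length := by omega
    have hget : PySem.List.pyGetD row (y - 1) 0 = row[n] := by
      rw [PySem.List.pyGetD_eq_getElem row 0 (by omega) (by omega)]
      simp [show (y - 1).toNat = n from by omega]
    have htake : row.take y.toNat = row.take n ++ [row[n]] := by
      have hyn : y.toNat = n + 1 := by omega
      rw [hyn, List.take_add_one, List.getElem?_eq_getElem hidx]
      rfl
    have hne : y ≠ 0 := by omega
    by_cases hc : row[n] = 1
    · have h1 : (y - 1).toNat = n := by omega
      rw [goLeft, if_neg hne, hget, if_pos hc, ih row (y - 1) (by omega) (by omega),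
        htake, List.reverse_append, h1]
      simp [runLen, hc]
      ring
    · rw [goLeft, if_neg hne, hget, if_neg hc, htake, List.reverse_append]
      simp [runLen, hc]

lemma getD_drop (l : List Int) (a j : Nat) : (l.drop a).getD j 0 = l.getD (a + j) 0 := by
  simp [List.getD_eq_getElem?_getD, List.getElem?_drop]

-- the run containing index k with value 1 measures A's rightward walk exactly
lemma runLen_drop_of_run (row : List Int) (k v s e : Int) (hk : 0 ≤ k)
    (hg : goodRun row v s e) (hs : s ≤ k) (hke : k < e) (hv : v = 1) :
    runLen (row.drop k.toNat) = e - k := by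
  obtain ⟨hs0, hse, hen, hvrow, hconst, -, hRB⟩ := hg
  have hm : runLen (row.drop k.toNat) = ((e - k).toNat : Int) := by
    apply runLen_eq_of
    · intro j hj
      rw [getD_drop]
      have h1 := hconst (k + (j : Int)) (by omega) (by omega)
      rw [show (k + (j : Int)).toNat = k.toNat + j by omega] at h1
      rw [h1, hv]
    · rcases hRB with h | h
      · left
        simp only [List.length_drop]
        omega
      · right
        rw [getD_drop, show k.toNat + (e - k).toNat = e.toNat by omega, ← hv]
        exact h
  rw [hm]
  omega

-- the run containing index y-1 with value 1 measures A's leftward walk exactly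
lemma runLen_rev_take_of_run (row : List Int) (y v s e : Int) (hy : 0 < y)
    (hyn : y.toNat ≤ row.length)
    (hg : goodRun row v s e) (hs : s ≤ y - 1) (hke : y - 1 < e) (hv : v = 1) :
    runLen ((row.take y.toNat).reverse) = y - s := by
  obtain ⟨hs0, hse, hen, hvrow, hconst, hLB, -⟩ := hg
  have hlen : ((row.take y.toNat).reverse).length = y.toNat := by
    simp only [List.length_reverse, List.length_take]
    omega
  have hgetl : ∀ j : Nat, j < y.toNat →
      ((row.take y.toNat).reverse).getD j 0 = row.getD (y.toNat - 1 - j) 0 := by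
    intro j hj
    have h1 : j < (row.take y.toNat).length := by
      simp only [List.length_take]; omega
    rw [List.getD_eq_getElem?_getD, List.getD_eq_getElem?_getD,
      List.getElem?_reverse h1, List.length_take,
      show min y.toNat row.length - 1 - j = y.toNat - 1 - j by omega,
      List.getElem?_take_of_lt (by omega)]
  have hm : runLen ((row.take y.toNat).reverse) = ((y - s).toNat : Int) := by
    apply runLen_eq_of
    · intro j hj
      rw [hgetl j (by omega)]
      have h1 := hconst (y - 1 - (j : Int)) (by omega) (by omega)
      rw [show (y - 1 - (j : Int)).toNat = y.toNat - 1 - j by omega] at h1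
      rw [h1, hv]
    · rcases hLB with h | h
      · left
        rw [hlen]
        omega
      · have hs1 : 1 ≤ s := by
          rcases lt_or_ge s 1 with h2 | h2
          · exfalso
            have h3 : s = 0 := by omega
            have h4 := hconst s (le_refl s) hse
            rw [h3] at h
            simp at h
            rw [h3] at h4
            simp at h4
            exact h h4
          · exact h2
        right
        rw [hgetl ((y - s).toNat) (by omega),
          show y.toNat - 1 - (y - s).toNat = (s - 1).toNat by omega]
        exact hv ▸ h
  rw [hm]
  omega

-- ===== VERDICT (by name: the statement is the Claim_ definition above) =====
theorem check_spec : Claim_equal_check := by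
  intro ladders x y _ hpre
  obtain ⟨hxl, hxu, hy99, hcase⟩ := hpre
  unfold Spec_check check check_alt leftCase
  set row := PySem.List.pyGetD ladders x ([] : List Int) with hrowdef
  set runs := buildRuns row with hrunsdef
  obtain ⟨hB5, hB6⟩ := buildRuns_spec row
  have hPg : ∀ j : Int, 0 ≤ j → j < (row.length : Int) →
      PySem.List.pyGetD row j 0 = row.getD j.toNat 0 := by
    intro j h1 h2
    rw [PySem.List.pyGetD_eq_getElem row 0 h1 (by omega)]
    rw [List.getD_eq_getElem?_getD, List.getElem?_eq_getElem (by omega)]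
    rfl
  simp only []
  rcases hcase with ⟨hy0, hc2⟩ | ⟨hyneg, hwl, hg1, hg2⟩
  · by_cases h99 : y = 99
    · -- y = 99: only the leftward case is live
      have hL : 99 ≤ row.length := by
        rcases hc2 with ⟨-, h⟩ | ⟨h, -⟩
        · exact h
        · omega
      obtain ⟨v, s, e, hblock, hsk, hke, hg⟩ := hB5 (y - 1) (by omega) (by omega)
      have hv : row.getD (y - 1).toNat 0 = v := hg.2.2.2.2.1 (y - 1) hsk hke
      have hguard : PySem.List.pyGetD row (y - 1) 0 = v := by
        rw [hPg (y - 1) (by omega) (by omega), hv]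
      have h0y : (0 : Int) < y := by omega
      rw [if_pos h99, if_neg (show ¬ y < 99 by omega), hguard, hblock]
      by_cases hv1 : v = 1
      · rw [if_pos hv1, goLeft_eq y.toNat row y (by omega) (by omega),
          runLen_rev_take_of_run row y v s e (by omega) (by omega) hg hsk hke hv1]
        simp [h0y, hv1]
      · rw [if_neg hv1]
        simp [h0y, hv1]
    · -- 0 ≤ y < 99: the rightward neighbour decides first
      obtain ⟨hylt, hyL, -⟩ : y < 99 ∧ y + 1 < (row.length : Int) ∧ _ := by
        rcases hc2 with ⟨h, -⟩ | h
        · omega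
        · exact h
      obtain ⟨v, s, e, hblock, hsk, hke, hg⟩ := hB5 (y + 1) (by omega) (by omega)
      have hv : row.getD (y + 1).toNat 0 = v := hg.2.2.2.2.1 (y + 1) hsk hke
      have hguard : PySem.List.pyGetD row (y + 1) 0 = v := by
        rw [hPg (y + 1) (by omega) (by omega), hv]
      rw [if_neg h99, if_pos hylt, hguard, hblock]
      by_cases hv1 : v = 1
      · have hA : goRight row (99 - y).toNat y = min (e - 1) 99 := by
          rw [goRight_eq (99 - y).toNat row y (by omega) (by omega),
            runLen_take, runLen_drop_of_run row (y + 1) v s e (by omega) hg hsk hke hv1]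
          rw [show ((99 - y).toNat : Int) = 99 - y by omega]
          omega
        by_cases h0 : y = 0
        · rw [if_pos h0, if_pos hv1, hA]
          simp [hv1]
        · rw [if_neg h0, if_pos hv1, hA]
          simp [hv1]
      · by_cases h0 : y = 0
        · rw [if_pos h0, if_neg hv1]
          simp [hv1, show ¬ (0 : Int) < y by omega]
        · rw [if_neg h0, if_neg hv1]
          obtain ⟨v2, s2, e2, hblock2, hsk2, hke2, hg2'⟩ := hB5 (y - 1) (by omega) (by omega)
          have hv2 : row.getD (y - 1).toNat 0 = v2 := hg2'.2.2.2.2.1 (y - 1) hsk2 hke2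
          have hguard2 : PySem.List.pyGetD row (y - 1) 0 = v2 := by
            rw [hPg (y - 1) (by omega) (by omega), hv2]
          rw [hguard2, hblock2]
          by_cases hv21 : v2 = 1
          · rw [if_pos hv21, goLeft_eq y.toNat row y (by omega) (by omega),
              runLen_rev_take_of_run row y v2 s2 e2 (by omega) (by omega) hg2' hsk2 hke2 hv21]
            simp [hv1, hv21, show (0 : Int) < y by omega]
          · rw [if_neg hv21]
            simp [hv1, hv21, show (0 : Int) < y by omega]
  · -- y < 0: every guard of A is false inside Pre_, and B finds no usable block
    rw [if_neg (show y ≠ 99 by omega), if_neg (show y ≠ 0 by omega), if_neg hg1, if_neg hg2,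
      if_pos (show y < 99 by omega)]
    by_cases hym1 : y = -1
    · obtain ⟨v, s, e, hblock, hsk, hke, hg⟩ := hB5 (y + 1) (by omega) (by omega)
      have hv : row.getD (y + 1).toNat 0 = v := hg.2.2.2.2.1 (y + 1) hsk hke
      have hvne : v ≠ 1 := by
        rw [← hv, ← hPg (y + 1) (by omega) (by omega)]
        exact hg1
      rw [hblock]
      simp [hvne, show ¬ (0 : Int) < y by omega]
    · rw [hB6 (y + 1) (Or.inl (by omega))]
      simp [show ¬ (0 : Int) < y by omega]
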